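-- pv_equiv track=rewrite | github.com/Ignacio-Jimenez-Diaz/repaso-tema-1 | ejercicio_1.py | decodificar_sin_re
-- ===== SOURCE A (Python) =====
-- def decodificar_sin_re(cadena, mayusculas=True, conservar_espacios=True):
--     if not isinstance(cadena, str):
--         raise TypeError("Se requiere una cadena")
--     invertida = cadena[::-1]
--     lista = []
--     prev_space = False
--     for ch in invertida:
--         if ch.isalpha():
--             lista.append(ch)
--             prev_space = False
--         elif conservar_espacios and ch.isspace():
--             if not prev_space:
--                 lista.append(' ')
--                 prev_space = True
--     limpia = ''.join(lista).strip()
--     return limpia.upper() if mayusculas else limpia.lower()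
-- ===== SOURCE B (Python) =====
-- def decodificar_sin_re(cadena, mayusculas=True, conservar_espacios=True):
--     if not isinstance(cadena, str):
--         raise TypeError("Se requiere una cadena")
--     filtrada = ''.join(
--         c if c.isalpha() else ' '
--         for c in reversed(cadena)
--         if c.isalpha() or (conservar_espacios and c.isspace()))
--     limpia = ' '.join(filtrada.split())
--     return limpia.upper() if mayusculas else limpia.lower()
-- ===== Notes on version B (the rewrite author's own statement) =====
-- stated objective: idiomatic
-- what changed: Replaces the explicit prev_space state machine and list accumulator with a filter/map comprehension followed by ' '.join(filtered.split()), which collapses space runs and strips ends declaratively.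
import Mathlib
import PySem

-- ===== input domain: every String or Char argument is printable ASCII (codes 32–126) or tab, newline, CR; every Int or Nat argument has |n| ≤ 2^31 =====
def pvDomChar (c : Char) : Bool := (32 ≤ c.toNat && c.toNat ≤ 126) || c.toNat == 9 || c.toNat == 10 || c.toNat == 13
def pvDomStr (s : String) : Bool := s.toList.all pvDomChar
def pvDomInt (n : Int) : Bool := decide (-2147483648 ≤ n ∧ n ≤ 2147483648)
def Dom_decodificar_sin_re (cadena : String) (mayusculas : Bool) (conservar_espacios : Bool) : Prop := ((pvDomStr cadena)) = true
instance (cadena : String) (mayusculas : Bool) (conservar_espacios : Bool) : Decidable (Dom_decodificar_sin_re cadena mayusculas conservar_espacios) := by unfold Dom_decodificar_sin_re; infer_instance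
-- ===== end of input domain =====

-- B replaces A's prev_space state machine by a filter/map pass plus ' '.join(split()) (idiomatic, same cost).

-- ===== PORT A =====
-- A-side helper: the loop body of A's for-loop (state = (lista, prev_space))
def pvStepA (k : Bool) (st : List Char × Bool) (ch : Char) : List Char × Bool :=
  if PySem.Chars.isalpha ch then (st.1 ++ [ch], false)
  else if k && PySem.Chars.isspace ch then
    (if st.2 then st else (st.1 ++ [' '], true))
  else st

-- cadena[::-1] is cadena.toList.reverse (PySem.Str.slice?_none_none_neg_one);
-- ''.join(lista).strip() is PySem.Chars.strip; upper/lower per mayusculas.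
def decodificar_sin_re (cadena : String) (mayusculas : Bool) (conservar_espacios : Bool) : String :=
  let invertida : List Char := cadena.toList.reverse
  let res := invertida.foldl (pvStepA conservar_espacios) (([] : List Char), false)
  let limpia := PySem.Chars.strip res.1
  if mayusculas then String.ofList (PySem.Chars.upper limpia)
  else String.ofList (PySem.Chars.lower limpia)

-- ===== PORT B =====
-- B-side helper: the filter/map of B's conditional generator expression
def pvPhi (k : Bool) (c : Char) : Option Char :=
  if PySem.Chars.isalpha c || (k && PySem.Chars.isspace c) then
    some (if PySem.Chars.isalpha c then c else ' ')
  else none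

-- ' '.join(filtrada.split()) is PySem.Chars.join [' '] ∘ PySem.Chars.split₀.
def decodificar_sin_re_alt (cadena : String) (mayusculas : Bool) (conservar_espacios : Bool) : String :=
  let filtrada : List Char := cadena.toList.reverse.filterMap (pvPhi conservar_espacios)
  let limpia := PySem.Chars.join [' '] (PySem.Chars.split₀ filtrada)
  if mayusculas then String.ofList (PySem.Chars.upper limpia)
  else String.ofList (PySem.Chars.lower limpia)

-- ===== PRECONDITION & SPEC =====
def Spec_decodificar_sin_re (cadena : String) (mayusculas : Bool) (conservar_espacios : Bool) (out : String) : Prop := out = decodificar_sin_re_alt cadena mayusculas conservar_espacios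
instance (cadena : String) (mayusculas : Bool) (conservar_espacios : Bool) (out : String) : Decidable (Spec_decodificar_sin_re cadena mayusculas conservar_espacios out) := by unfold Spec_decodificar_sin_re; infer_instance

-- ===== CLAIM (what is proved, stated in full; the proofs are below) =====
def Claim_equal_decodificar_sin_re : Prop := ∀ (cadena : String) (mayusculas : Bool) (conservar_espacios : Bool), Dom_decodificar_sin_re cadena mayusculas conservar_espacios → Spec_decodificar_sin_re cadena mayusculas conservar_espacios (decodificar_sin_re cadena mayusculas conservar_espacios)

-- ===== LEMMAS AND PROOFS =====

def pvStep2 (st : List Char × Bool) (c : Char) : List Char × Bool :=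
  if PySem.Chars.isalpha c then (st.1 ++ [c], false)
  else if st.2 then st else (st.1 ++ [' '], true)

def pvWords : List Char → List (List Char)
  | [] => []
  | c :: f =>
    if PySem.Chars.isspace c then pvWords f
    else (c :: f.takeWhile (fun d => !PySem.Chars.isspace d)) ::
         pvWords (f.dropWhile (fun d => !PySem.Chars.isspace d))
termination_by f => f.length
decreasing_by
  · simp only [List.length_cons]; omega
  · simp only [List.length_cons]; exact Nat.lt_succ_of_le (List.length_dropWhile_le _ _)

def pvCollapse : List Char → List Char
  | [] => []
  | c :: f =>
    if PySem.Chars.isspace c then ' ' :: pvCollapse (f.dropWhile PySem.Chars.isspace)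
    else c :: pvCollapse f
termination_by f => f.length
decreasing_by
  · simp only [List.length_cons]; exact Nat.lt_succ_of_le (List.length_dropWhile_le _ _)
  · simp only [List.length_cons]; omega

lemma pv_isspace_of_isalpha (c : Char) (h : PySem.Chars.isalpha c = true) : PySem.Chars.isspace c = false := by
  simp only [PySem.Chars.isalpha, PySem.Chars.isupper, PySem.Chars.islower, Bool.or_eq_true,
    Bool.and_eq_true, decide_eq_true_eq] at h
  have hn : (65 ≤ c.toNat ∧ c.toNat ≤ 90) ∨ (97 ≤ c.toNat ∧ c.toNat ≤ 122) := by
    rcases h with ⟨h1, h2⟩ | ⟨h1, h2⟩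
    · exact Or.inl ⟨UInt32.le_iff_toNat_le.mp h1, UInt32.le_iff_toNat_le.mp h2⟩
    · exact Or.inr ⟨UInt32.le_iff_toNat_le.mp h1, UInt32.le_iff_toNat_le.mp h2⟩
  simp only [PySem.Chars.isspace]
  simp only [Bool.or_eq_false_iff, Bool.and_eq_false_iff, decide_eq_false_iff_not]
  omega

lemma pv_bridge (k : Bool) : ∀ (r : List Char) (st : List Char × Bool),
    r.foldl (pvStepA k) st = (r.filterMap (pvPhi k)).foldl pvStep2 st := by
  intro r
  induction r with
  | nil => intro st; rfl
  | cons c r ih =>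
    intro st
    rw [List.foldl_cons, List.filterMap_cons]
    by_cases ha : PySem.Chars.isalpha c = true
    · have h1 : pvPhi k c = some c := by simp [pvPhi, ha]
      have h2 : pvStepA k st c = (st.1 ++ [c], false) := by simp [pvStepA, ha]
      have h3 : pvStep2 st c = (st.1 ++ [c], false) := by simp [pvStep2, ha]
      rw [h1, List.foldl_cons, h2, h3, ih]
    · by_cases hs : (k && PySem.Chars.isspace c) = true
      · have h1 : pvPhi k c = some ' ' := by simp [pvPhi, ha, hs]
        have h2 : pvStepA k st c = (if st.2 then st else (st.1 ++ [' '], true)) := by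
          simp [pvStepA, ha, hs]
        have h3 : pvStep2 st ' ' = (if st.2 then st else (st.1 ++ [' '], true)) := by
          have : PySem.Chars.isalpha ' ' = false := by decide
          simp [pvStep2, this]
        rw [h1, List.foldl_cons, h2, h3, ih]
      · have h1 : pvPhi k c = none := by simp [pvPhi, ha, hs]
        have h2 : pvStepA k st c = st := by simp [pvStepA, ha, hs]
        rw [h1, h2, ih]

lemma pv_good (k : Bool) (r : List Char) :
    ∀ c ∈ r.filterMap (pvPhi k), PySem.Chars.isalpha c = true ∨ c = ' ' := by
  intro c hc
  simp only [List.mem_filterMap] at hc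
  obtain ⟨a, _, ha⟩ := hc
  unfold pvPhi at ha
  by_cases h1 : PySem.Chars.isalpha a = true
  · simp [h1] at ha; subst ha; exact Or.inl h1
  · by_cases h2 : (k && PySem.Chars.isspace a) = true
    · simp [h1, h2] at ha; subst ha; right; rfl
    · simp [h1, h2] at ha

lemma pv_step2_one (acc : List Char) (prev : Bool) (c : Char) :
    pvStep2 (acc, prev) c = (acc ++ (pvStep2 ([], prev) c).1, (pvStep2 ([], prev) c).2) := by
  unfold pvStep2
  by_cases ha : PySem.Chars.isalpha c = true
  · simp [ha]
  · cases prev <;> simp [ha]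

lemma pv_step2_shift : ∀ (f : List Char) (acc : List Char) (prev : Bool),
    f.foldl pvStep2 (acc, prev)
      = (acc ++ (f.foldl pvStep2 ([], prev)).1, (f.foldl pvStep2 ([], prev)).2) := by
  intro f
  induction f with
  | nil => intro acc prev; simp
  | cons c f ih =>
    intro acc prev
    simp only [List.foldl_cons]
    rw [pv_step2_one]
    rcases h : pvStep2 ([], prev) c with ⟨u, b⟩
    rw [ih (acc ++ u) b, ih u b, List.append_assoc]

lemma pv_R_true (f : List Char) (hg : ∀ c ∈ f, PySem.Chars.isalpha c = true ∨ c = ' ') :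
    (f.foldl pvStep2 ([], true)).1 = ((f.dropWhile PySem.Chars.isspace).foldl pvStep2 ([], false)).1 := by
  induction f with
  | nil => rfl
  | cons c f ih =>
    rcases hg c (List.mem_cons_self) with ha | hsp
    · have hs := pv_isspace_of_isalpha c ha
      rw [List.dropWhile_cons, if_neg (by simp [hs])]
      have h1 : pvStep2 ([], true) c = ([c], false) := by simp [pvStep2, ha]
      have h2 : pvStep2 ([], false) c = ([c], false) := by simp [pvStep2, ha]
      rw [List.foldl_cons, List.foldl_cons, h1, h2]
    · subst hsp
      have h1 : pvStep2 ([], true) ' ' = ([], true) := by decide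
      rw [List.foldl_cons, h1, List.dropWhile_cons, if_pos (by decide)]
      exact ih (fun c hc => hg c (List.mem_cons_of_mem _ hc))

lemma pv_R_false_eq_C (f : List Char) (hg : ∀ c ∈ f, PySem.Chars.isalpha c = true ∨ c = ' ') :
    (f.foldl pvStep2 ([], false)).1 = pvCollapse f := by
  induction f using pvCollapse.induct with
  | case1 => simp [pvCollapse]
  | case2 c f hs ih =>
    have hsp : c = ' ' := by
      rcases hg c List.mem_cons_self with ha | h
      · rw [pv_isspace_of_isalpha c ha] at hs; exact absurd hs (by simp)
      · exact h
    subst hsp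
    rw [pvCollapse, if_pos (by decide)]
    have h1 : pvStep2 ([], false) ' ' = ([' '], true) := by decide
    rw [List.foldl_cons, h1, pv_step2_shift]
    simp only [List.cons_append, List.nil_append]
    rw [pv_R_true f (fun c hc => hg c (List.mem_cons_of_mem _ hc))]
    congr 1
    exact ih (fun c hc => hg c (List.mem_cons_of_mem _ ((List.dropWhile_sublist _).mem hc)))
  | case3 c f hs ih =>
    rw [pvCollapse, if_neg (by simp [hs])]
    have ha : PySem.Chars.isalpha c = true := by
      rcases hg c List.mem_cons_self with h | h
      · exact h
      · subst h; exact absurd hs (by decide)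
    have h1 : pvStep2 ([], false) c = ([c], false) := by simp [pvStep2, ha]
    rw [List.foldl_cons, h1, pv_step2_shift]
    simp only [List.cons_append, List.nil_append]
    congr 1
    exact ih (fun d hd => hg d (List.mem_cons_of_mem _ hd))

lemma pv_head_dropWhile {p : Char → Bool} {f rest : List Char} {d : Char}
    (h : f.dropWhile p = d :: rest) : p d = false := by
  have h1 : f.dropWhile p ≠ [] := by simp [h]
  have h2 := List.head_dropWhile_not p h1
  have h3 : (f.dropWhile p).head h1 = d := by simp [h]
  rw [h3] at h2
  simpa using h2

lemma pv_go_spec : ∀ (f cur : List Char) (acc : List (List Char)),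
    PySem.Chars.split₀.go f cur acc =
      acc.reverse ++ (if cur.isEmpty then pvWords f
        else (cur.reverse ++ f.takeWhile (fun d => !PySem.Chars.isspace d)) ::
             pvWords (f.dropWhile (fun d => !PySem.Chars.isspace d))) := by
  intro f
  induction f with
  | nil =>
    intro cur acc
    simp only [PySem.Chars.split₀.go]
    cases cur <;> simp [pvWords]
  | cons c rest ih =>
    intro cur acc
    rw [PySem.Chars.split₀.go]
    by_cases hs : PySem.Chars.isspace c = true
    · rw [if_pos hs]
      cases cur with
      | nil =>
        simp only [List.isEmpty_nil, if_true]
        rw [ih, pvWords, if_pos hs]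
        simp
      | cons x xs =>
        simp only [List.isEmpty_cons, if_false, Bool.false_eq_true]
        rw [ih]
        have ht : (c :: rest).takeWhile (fun d => !PySem.Chars.isspace d) = [] := by
          simp [List.takeWhile_cons, hs]
        have hd : (c :: rest).dropWhile (fun d => !PySem.Chars.isspace d) = c :: rest := by
          simp [List.dropWhile_cons, hs]
        rw [ht, hd, pvWords, if_pos hs]
        simp
    · rw [if_neg hs]
      rw [ih]
      simp only [List.isEmpty_cons, if_false, Bool.false_eq_true, List.reverse_cons]
      have hb : PySem.Chars.isspace c = false := by simpa using hs
      cases cur with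
      | nil =>
        simp only [List.isEmpty_nil, if_true, List.reverse_nil]
        rw [pvWords, if_neg (by simp [hb])]
        simp
      | cons x xs =>
        simp only [List.isEmpty_cons, if_false, Bool.false_eq_true]
        have ht : (c :: rest).takeWhile (fun d => !PySem.Chars.isspace d)
            = c :: rest.takeWhile (fun d => !PySem.Chars.isspace d) := by
          simp [List.takeWhile_cons, hb]
        have hd : (c :: rest).dropWhile (fun d => !PySem.Chars.isspace d)
            = rest.dropWhile (fun d => !PySem.Chars.isspace d) := by
          simp [List.dropWhile_cons, hb]
        rw [ht, hd]
        simp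

lemma pv_split₀_eq (f : List Char) : PySem.Chars.split₀ f = pvWords f := by
  rw [PySem.Chars.split₀, pv_go_spec]
  simp

lemma pv_rstrip_cons_nonspace (a : Char) (X : List Char) (h : PySem.Chars.isspace a = false) :
    PySem.Chars.rstrip (a :: X) = a :: PySem.Chars.rstrip X := by
  simp only [PySem.Chars.rstrip, List.reverse_cons, List.dropWhile_append]
  by_cases he : (X.reverse.dropWhile PySem.Chars.isspace).isEmpty = true
  · rw [if_pos he]
    simp only [List.isEmpty_iff] at he
    simp [List.dropWhile_cons, h, he]
  · rw [if_neg he]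
    simp

lemma pv_rstrip_cons_space (X : List Char) :
    PySem.Chars.rstrip (' ' :: X) =
      if PySem.Chars.rstrip X = [] then [] else ' ' :: PySem.Chars.rstrip X := by
  simp only [PySem.Chars.rstrip, List.reverse_cons, List.dropWhile_append]
  by_cases he : (X.reverse.dropWhile PySem.Chars.isspace).isEmpty = true
  · rw [if_pos he]
    simp only [List.isEmpty_iff] at he
    rw [if_pos (by simp [he])]
    simp [List.dropWhile_cons, show PySem.Chars.isspace ' ' = true from by decide]
  · rw [if_neg he]
    simp only [List.isEmpty_iff] at he
    rw [if_neg (by simp [he])]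
    simp

lemma pv_join_word_cons (c : Char) (w : List Char) (ws : List (List Char)) :
    PySem.Chars.join [' '] ((c :: w) :: ws) = c :: PySem.Chars.join [' '] (w :: ws) := by
  cases ws <;> simp [PySem.Chars.join, List.intercalate, List.intersperse]

lemma pv_join_cons_cons (w y : List Char) (ws : List (List Char)) :
    PySem.Chars.join [' '] (w :: y :: ws) = w ++ ' ' :: PySem.Chars.join [' '] (y :: ws) := by
  simp [PySem.Chars.join, List.intercalate, List.intersperse]

lemma pv_join_ne_nil (w : List Char) (ws : List (List Char)) (hw : w ≠ []) :
    PySem.Chars.join [' '] (w :: ws) ≠ [] := by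
  cases ws <;> simp [PySem.Chars.join, List.intercalate, List.intersperse, hw]

lemma pv_words_dropWhile (f : List Char) :
    pvWords (f.dropWhile PySem.Chars.isspace) = pvWords f := by
  induction f with
  | nil => rfl
  | cons c f ih =>
    by_cases hs : PySem.Chars.isspace c = true
    · rw [List.dropWhile_cons, if_pos hs, ih, pvWords, if_pos hs]
    · rw [List.dropWhile_cons, if_neg (by simp_all)]

lemma pvQ : ∀ f : List Char, PySem.Chars.rstrip (pvCollapse f) =
    PySem.Chars.join [' '] ((f.takeWhile (fun d => !PySem.Chars.isspace d)) ::
      pvWords (f.dropWhile (fun d => !PySem.Chars.isspace d))) := by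
  intro f
  induction f using pvCollapse.induct with
  | case1 =>
    simp [pvCollapse, pvWords, PySem.Chars.rstrip, PySem.Chars.join, List.intercalate]
  | case2 c f hs ih =>
    rw [pvCollapse, if_pos hs]
    have ht : (c :: f).takeWhile (fun d => !PySem.Chars.isspace d) = [] := by
      simp [List.takeWhile_cons, hs]
    have hd : (c :: f).dropWhile (fun d => !PySem.Chars.isspace d) = c :: f := by
      simp [List.dropWhile_cons, hs]
    rw [ht, hd]
    have hw : pvWords (c :: f) = pvWords (f.dropWhile PySem.Chars.isspace) := by
      rw [pvWords, if_pos hs, pv_words_dropWhile]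
    rw [hw]
    rcases hf : f.dropWhile PySem.Chars.isspace with _ | ⟨d, rest⟩
    · have : PySem.Chars.rstrip (' ' :: pvCollapse []) = [] := by
        rw [show pvCollapse [] = [] from by simp [pvCollapse]]; decide
      rw [this, pvWords]
      simp [PySem.Chars.join, List.intercalate]
    · have hdns : PySem.Chars.isspace d = false := pv_head_dropWhile hf
      rw [hf] at ih
      have hC : pvCollapse (d :: rest) = d :: pvCollapse rest := by
        rw [pvCollapse, if_neg (by simp [hdns])]
      -- rstrip (pvCollapse (d::rest)) = join (pvWords (d::rest))
      have ht2 : (d :: rest).takeWhile (fun x => !PySem.Chars.isspace x)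
          = d :: rest.takeWhile (fun x => !PySem.Chars.isspace x) := by
        simp [List.takeWhile_cons, hdns]
      have hd2 : (d :: rest).dropWhile (fun x => !PySem.Chars.isspace x)
          = rest.dropWhile (fun x => !PySem.Chars.isspace x) := by
        simp [List.dropWhile_cons, hdns]
      have hwords : pvWords (d :: rest)
          = (d :: rest.takeWhile (fun x => !PySem.Chars.isspace x)) ::
            pvWords (rest.dropWhile (fun x => !PySem.Chars.isspace x)) := by
        rw [pvWords, if_neg (by simp [hdns])]
      have key : PySem.Chars.rstrip (pvCollapse (d :: rest))
          = PySem.Chars.join [' '] (pvWords (d :: rest)) := by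
        rw [ih, ht2, hd2, hwords]
      have hne : PySem.Chars.rstrip (pvCollapse (d :: rest)) ≠ [] := by
        rw [key, hwords]
        exact pv_join_ne_nil _ _ (by simp)
      rw [pv_rstrip_cons_space, if_neg hne, key, hwords, pv_join_cons_cons]
      simp
  | case3 c f hs ih =>
    have hb : PySem.Chars.isspace c = false := by simpa using hs
    rw [pvCollapse, if_neg (by simp [hb])]
    rw [pv_rstrip_cons_nonspace _ _ hb, ih]
    have ht : (c :: f).takeWhile (fun d => !PySem.Chars.isspace d)
        = c :: f.takeWhile (fun d => !PySem.Chars.isspace d) := by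
      simp [List.takeWhile_cons, hb]
    have hd : (c :: f).dropWhile (fun d => !PySem.Chars.isspace d)
        = f.dropWhile (fun d => !PySem.Chars.isspace d) := by
      simp [List.dropWhile_cons, hb]
    rw [ht, hd, pv_join_word_cons]

lemma pvP : ∀ f : List Char, PySem.Chars.strip (pvCollapse f) =
    PySem.Chars.join [' '] (pvWords f) := by
  intro f
  induction f using pvCollapse.induct with
  | case1 => simp [pvCollapse, pvWords, PySem.Chars.strip, PySem.Chars.lstrip,
      PySem.Chars.rstrip, PySem.Chars.join, List.intercalate]
  | case2 c f hs ih =>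
    rw [pvCollapse, if_pos hs]
    have hw : pvWords (c :: f) = pvWords (f.dropWhile PySem.Chars.isspace) := by
      rw [pvWords, if_pos hs, pv_words_dropWhile]
    rw [hw]
    simp only [PySem.Chars.strip, PySem.Chars.lstrip] at ih ⊢
    rw [List.dropWhile_cons, if_pos (by decide)]
    rcases hf : f.dropWhile PySem.Chars.isspace with _ | ⟨d, rest⟩
    · rw [hf] at ih; exact ih
    · rw [hf] at ih; exact ih
  | case3 c f hs ih =>
    have hb : PySem.Chars.isspace c = false := by simpa using hs
    rw [pvCollapse, if_neg (by simp [hb])]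
    simp only [PySem.Chars.strip, PySem.Chars.lstrip]
    rw [List.dropWhile_cons, if_neg (by simp [hb])]
    rw [pv_rstrip_cons_nonspace _ _ hb]
    have hQ := pvQ f
    rw [hQ]
    have ht : (c :: f).takeWhile (fun d => !PySem.Chars.isspace d)
        = c :: f.takeWhile (fun d => !PySem.Chars.isspace d) := by
      simp [List.takeWhile_cons, hb]
    have hd : (c :: f).dropWhile (fun d => !PySem.Chars.isspace d)
        = f.dropWhile (fun d => !PySem.Chars.isspace d) := by
      simp [List.dropWhile_cons, hb]
    rw [pvWords, if_neg (by simp [hb]), pv_join_word_cons]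


theorem decodificar_sin_re_spec : Claim_equal_decodificar_sin_re := by
  intro cadena mayusculas conservar_espacios _
  unfold Spec_decodificar_sin_re decodificar_sin_re decodificar_sin_re_alt
  have key : PySem.Chars.strip ((cadena.toList.reverse.foldl (pvStepA conservar_espacios) ([], false)).1)
      = PySem.Chars.join [' ']
          (PySem.Chars.split₀ (cadena.toList.reverse.filterMap (pvPhi conservar_espacios))) := by
    rw [pv_bridge, pv_R_false_eq_C _ (pv_good conservar_espacios cadena.toList.reverse),
      pv_split₀_eq, pvP]
  cases mayusculas <;> simp only [if_true, if_false, Bool.false_eq_true, key]
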